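-- pv_equiv track=rewrite | github.com/jmeile/JMMidiBassPedalController | src/ByteUtilities.py | convert_byte_array_to_list
-- ===== SOURCE A (Python) =====
-- def convert_byte_array_to_list(source_bytes):
--   """
--   Converts the entered byte array to a list of bytes, returns the computed
--   lengths for sending the data through SysEx and the sum of its bytes.
--
--   Parameters:
--   * source_bytes: bytes to convert
--
--   Returns a tuple containing the list of bytes, the computed lengths, and the
--   sum of its bytes.
--
--   Remaks:
--   * The method will itearate through the whole source_bytes parameters and gets
--     each byte and put it into a list.
--   * Parallely, the cumulated lengths will be calculated as follows:
--     - If at some point the length of the processed bytes superates 127, then a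
--       hex 00H will be written to lengths_lst indicating that the length will
--       continue summing on the next field.
--     - Otherwise the hex of the cumulated value will be written.
--     - Each byte will be also summed
--   """
--   cumulated_length = 0
--   byte_sum = 0
--   lengths_lst = []
--   byte_lst = []
--   for byte in source_bytes:
--     byte_lst += [byte]
--     byte_sum += byte
--     cumulated_length += 1
--     if cumulated_length > 0x7F:
--       cumulated_length = 1
--       lengths_lst += [0x00]
--   lengths_lst += [cumulated_length]
--   byte_sum += cumulated_length
--   return byte_lst, lengths_lst, byte_sum
-- ===== SOURCE B (Python) =====
-- def convert_byte_array_to_list(source_bytes):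
--   """Closed-form re-implementation: lengths derived arithmetically instead of counting in a loop."""
--   byte_lst = list(source_bytes)
--   n = len(byte_lst)
--   byte_sum = sum(byte_lst)
--   if n == 0:
--     final, k = 0, 0
--   else:
--     final, k = (n - 1) % 127 + 1, (n - 1) // 127
--   lengths_lst = [0x00] * k + [final]
--   return byte_lst, lengths_lst, byte_sum + final
-- ===== Notes on version B (the rewrite author's own statement) =====
-- stated objective: simpler
-- what changed: Replaces the byte-by-byte loop that maintains a cumulated-length counter with a closed-form computation: list()+sum() for the bytes and their sum, and (n-1)%127+1 / (n-1)//127 for the final length and the number of 0x00 continuation markers.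
import Mathlib
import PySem

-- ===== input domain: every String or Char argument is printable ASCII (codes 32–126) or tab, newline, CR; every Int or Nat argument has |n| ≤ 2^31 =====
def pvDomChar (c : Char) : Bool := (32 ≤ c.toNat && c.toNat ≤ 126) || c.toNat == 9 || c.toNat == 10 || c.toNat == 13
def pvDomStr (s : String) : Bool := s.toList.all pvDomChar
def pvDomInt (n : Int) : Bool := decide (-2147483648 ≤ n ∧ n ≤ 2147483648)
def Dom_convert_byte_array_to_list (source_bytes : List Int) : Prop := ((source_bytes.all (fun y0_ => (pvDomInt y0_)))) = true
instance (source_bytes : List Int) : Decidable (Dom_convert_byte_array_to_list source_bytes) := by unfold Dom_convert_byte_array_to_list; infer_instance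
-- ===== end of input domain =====

-- B computes the SysEx lengths in closed form instead of A's counting loop (objective: simpler).

-- ===== PORT A =====
-- loop body: state = (byte_lst, byte_sum, cumulated_length, lengths_lst)
def pvStepA (st : List Int × Int × Int × List Int) (byte : Int) : List Int × Int × Int × List Int :=
  let bl := st.1 ++ [byte]
  let bs := st.2.1 + byte
  let cl := st.2.2.1 + 1
  if cl > 0x7F then (bl, bs, 1, st.2.2.2 ++ [0x00])
  else (bl, bs, cl, st.2.2.2)

def convert_byte_array_to_list (source_bytes : List Int) : List Int × List Int × Int :=
  let st := source_bytes.foldl pvStepA ([], 0, 0, [])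
  (st.1, st.2.2.2 ++ [st.2.2.1], st.2.1 + st.2.2.1)

-- ===== PORT B =====
def convert_byte_array_to_list_alt (source_bytes : List Int) : List Int × List Int × Int :=
  let byte_lst := source_bytes
  let n : Int := byte_lst.length
  let byte_sum := byte_lst.sum
  let fk : Int × Int :=
    if n = 0 then (0, 0)
    else (PySem.Int.mod (n - 1) 127 + 1, PySem.Int.floordiv (n - 1) 127)
  let lengths_lst := List.replicate fk.2.toNat 0 ++ [fk.1]
  (byte_lst, lengths_lst, byte_sum + fk.1)

-- ===== PRECONDITION & SPEC =====
def Spec_convert_byte_array_to_list (source_bytes : List Int) (out : List Int × List Int × Int) : Prop := out = convert_byte_array_to_list_alt source_bytes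
instance (source_bytes : List Int) (out : List Int × List Int × Int) : Decidable (Spec_convert_byte_array_to_list source_bytes out) := by unfold Spec_convert_byte_array_to_list; infer_instance

-- ===== CLAIM (what is proved, stated in full; the proofs are below) =====
def Claim_equal_convert_byte_array_to_list : Prop := ∀ (source_bytes : List Int), Dom_convert_byte_array_to_list source_bytes → Spec_convert_byte_array_to_list source_bytes (convert_byte_array_to_list source_bytes)

-- ===== LEMMAS AND PROOFS =====

-- invariant characterisation of A's loop from an arbitrary well-formed state
lemma pvLoopA_char (xs : List Int) (bl ll : List Int) (bs c : Int)
    (h0 : 0 ≤ c) (h1 : c ≤ 127) :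
    xs.foldl pvStepA (bl, bs, c, ll) =
      (bl ++ xs, bs + xs.sum,
       (if c + (xs.length : Int) = 0 then 0 else (c + (xs.length : Int) - 1) % 127 + 1),
       ll ++ List.replicate ((c + (xs.length : Int) - 1) / 127).toNat 0) := by
  induction xs generalizing bl ll bs c with
  | nil =>
      simp only [List.foldl_nil, List.length_nil, List.sum_nil, List.append_nil,
        Int.natCast_zero, add_zero]
      have hK : ((c - 1) / 127).toNat = 0 := by omega
      rcases eq_or_lt_of_le h0 with h | h
      · simp [← h]
      · have hne : ¬ c = 0 := by omega
        have hmod : (c - 1) % 127 = c - 1 := by omega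
        simp [hne, hmod, hK]
  | cons x xs ih =>
      simp only [List.foldl_cons]
      by_cases hc : c + 1 > 0x7F
      · -- c = 127, reset to 1 and append a 0x00 marker
        have hc' : c = 127 := by omega
        simp only [pvStepA, hc, if_pos]
        rw [ih (bl ++ [x]) (ll ++ [0]) (bs + x) 1 (by omega) (by omega)]
        subst hc'
        have hne1 : ¬ (1 + (xs.length : Int) = 0) := by positivity
        have hne2 : ¬ (127 + ((xs.length : Int) + 1) = 0) := by positivity
        have hmod : (1 + (xs.length : Int) - 1) % 127 + 1
            = (127 + ((xs.length : Int) + 1) - 1) % 127 + 1 := by omega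
        have hdiv : ((1 + (xs.length : Int) - 1) / 127).toNat + 1
            = ((127 + ((xs.length : Int) + 1) - 1) / 127).toNat := by omega
        simp only [Prod.mk.injEq]
        refine ⟨by simp, by simp; ring, ?_, ?_⟩
        · simp only [List.length_cons, Int.natCast_add, Int.natCast_one, hne1, hne2,
            if_neg, not_false_iff]
          omega
        · simp only [List.length_cons, Int.natCast_add, Int.natCast_one]
          rw [List.append_assoc, ← hdiv]
          simp [List.replicate_succ]
      · simp only [pvStepA, hc, if_neg, not_false_iff]
        rw [ih (bl ++ [x]) ll (bs + x) (c + 1) (by omega) (by omega)]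
        have harith : c + 1 + (xs.length : Int) = c + ((xs.length : Int) + 1) := by ring
        simp only [Prod.mk.injEq]
        exact ⟨by simp, by simp; ring,
          by simp only [List.length_cons, Int.natCast_add, Int.natCast_one, harith],
          by simp only [List.length_cons, Int.natCast_add, Int.natCast_one, harith]⟩

-- ===== VERDICT (by name: the statement is the Claim_ definition above) =====
theorem convert_byte_array_to_list_spec : Claim_equal_convert_byte_array_to_list := by
  intro xs _
  unfold Spec_convert_byte_array_to_list convert_byte_array_to_list convert_byte_array_to_list_alt
  simp only [pvLoopA_char xs [] [] 0 0 (le_refl 0) (by norm_num), zero_add, List.nil_append]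
  by_cases h : (xs.length : Int) = 0
  · simp [h]
  · have hmod : PySem.Int.mod ((xs.length : Int) - 1) 127 = ((xs.length : Int) - 1) % 127 := by
      simp [PySem.Int.mod]; rw [Int.fmod_eq_emod_of_nonneg]; norm_num
    have hdiv : PySem.Int.floordiv ((xs.length : Int) - 1) 127 = ((xs.length : Int) - 1) / 127 := by
      simp [PySem.Int.floordiv]; rw [Int.fdiv_eq_ediv_of_nonneg]; norm_num
    simp only [h, if_neg, not_false_iff, hmod, hdiv]
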